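-- pv_equiv track=rewrite | github.com/matthubb/Advent2019 | day004.py | skip_numbers
-- ===== SOURCE A (Python) =====
-- def skip_numbers(number):
--   prev = 0
--   replace = None
--   result = []
--   for digit in (int(x) for x in str(number)):
--     if replace is not None:
--       result.append(replace)
--     elif digit < prev:
--       replace = str(prev)
--       result.append(replace)
--     else:
--       prev = digit
--       result.append(str(digit))
--   return int("".join(result))
-- ===== SOURCE B (Python) =====
-- def skip_numbers(number):
--     # Two-phase: extend the longest nondecreasing digit prefix, then pad
--     # the rest of the length with that prefix's last digit.
--     digits = [int(x) for x in str(number)]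
--     prefix = digits[:1]
--     for d in digits[1:]:
--         if d < prefix[-1]:
--             break
--         prefix.append(d)
--     filled = prefix + [prefix[-1]] * (len(digits) - len(prefix))
--     return int("".join(map(str, filled)))
-- ===== Notes on version B (the rewrite author's own statement) =====
-- stated objective: simpler
-- what changed: A's single-pass flag-driven state machine (prev/replace/result strings) is replaced by a two-phase decomposition: extend the longest nondecreasing digit prefix, then pad to full length by list repetition of its last digit; Pre_ excludes negative numbers, on which A raises ValueError (int('-')).
import Mathlib
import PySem

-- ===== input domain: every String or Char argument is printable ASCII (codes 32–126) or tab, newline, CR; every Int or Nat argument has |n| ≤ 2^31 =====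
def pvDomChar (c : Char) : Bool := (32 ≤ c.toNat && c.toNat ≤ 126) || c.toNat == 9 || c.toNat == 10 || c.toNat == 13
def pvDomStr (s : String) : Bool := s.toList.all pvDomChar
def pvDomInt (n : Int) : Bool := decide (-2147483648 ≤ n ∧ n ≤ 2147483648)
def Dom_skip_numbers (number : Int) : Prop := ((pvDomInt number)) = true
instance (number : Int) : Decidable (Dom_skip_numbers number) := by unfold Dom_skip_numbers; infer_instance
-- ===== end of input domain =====

-- B replaces A's flag-driven state machine by a two-phase decomposition (longest nondecreasing
-- digit prefix, then pad by repetition); equal return values on all number ≥ 0 (A raises below 0).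

-- ===== PORT A =====
-- one loop step of A over the digit characters; state = (prev, replace, result);
-- int(x) is PySem.Int.ofStr? (none = ValueError; Pre_ excludes it)
def skipStepA (st : Int × Option String × List String) (x : Char) : Int × Option String × List String :=
  let digit := (PySem.Int.ofStr? (String.mk [x])).getD 0
  match st with
  | (prev, some r, result) => (prev, some r, result ++ [r])
  | (prev, none, result) =>
    if digit < prev then (prev, some (PySem.Int.toStr prev), result ++ [PySem.Int.toStr prev])
    else (digit, none, result ++ [PySem.Int.toStr digit])

def skip_numbers (number : Int) : Int :=
  let fin := (PySem.Int.toStr number).toList.foldl skipStepA (0, none, [])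
  (PySem.Int.ofStr? (PySem.Str.join "" fin.2.2)).getD 0

-- ===== PORT B =====
-- B's for-loop with break: extend prefix while the next digit is not smaller than prefix[-1]
def prefixLoop (pre : List Int) : List Int → List Int
  | [] => pre
  | d :: rest => if d < PySem.List.pyGetD pre (-1) 0 then pre else prefixLoop (pre ++ [d]) rest

def skip_numbers_alt (number : Int) : Int :=
  let digits := (PySem.Int.toStr number).toList.map (fun x => (PySem.Int.ofStr? (String.mk [x])).getD 0)
  let pre := prefixLoop (PySem.List.slice digits none (some 1)) (PySem.List.slice digits (some 1) none)
  let filled := pre ++ PySem.List.pyRepeat [PySem.List.pyGetD pre (-1) 0] ((digits.length : Int) - (pre.length : Int))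
  (PySem.Int.ofStr? (PySem.Str.join "" (filled.map PySem.Int.toStr))).getD 0

-- ===== PRECONDITION & SPEC =====
-- A raises ValueError on negative numbers (int('-') on the sign character); Pre_ excludes exactly those.
def Pre_skip_numbers (number : Int) : Prop := 0 ≤ number
instance (number : Int) : Decidable (Pre_skip_numbers number) := by unfold Pre_skip_numbers; infer_instance
def pvWitness_skip_numbers : Int := (223450)

def Spec_skip_numbers (number : Int) (out : Int) : Prop := out = skip_numbers_alt number
instance (number : Int) (out : Int) : Decidable (Spec_skip_numbers number out) := by unfold Spec_skip_numbers; infer_instance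

-- ===== CLAIM (what is proved, stated in full; the proofs are below) =====
def Claim_equal_skip_numbers : Prop := ∀ (number : Int), Dom_skip_numbers number → Pre_skip_numbers number → Spec_skip_numbers number (skip_numbers number)

-- ===== LEMMAS AND PROOFS =====

-- int(x) of one character, as an Int (0 where Python raises; harmless: Pre_ keeps us on digits)
def pvParse (c : Char) : Int := (PySem.Int.ofChars? [c]).getD 0

-- the value A forces from some point on: nondecreasing run continued from prev, then prev repeated
def fill2 (prev : Int) : List Int → List Int
  | [] => []
  | d :: rest => if d < prev then List.replicate (rest.length + 1) prev else d :: fill2 d rest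

-- the nondecreasing continuation of prev (what B's loop appends to its prefix)
def upTo (prev : Int) : List Int → List Int
  | [] => []
  | d :: rest => if d < prev then [] else d :: upTo d rest

theorem toList_mk (l : List Char) : (String.mk l).toList = l := (String.ofList_eq.mp rfl).symm

theorem parse_eq (x : Char) : (PySem.Int.ofStr? (String.mk [x])).getD 0 = pvParse x := by
  simp [PySem.Int.ofStr?, pvParse, toList_mk]

theorem parse_bind_nonneg (o : Option Nat) : 0 ≤ (o.bind fun a => some ((a : Int))).getD 0 := by
  cases o <;> simp

theorem parse_nonneg (c : Char) : 0 ≤ pvParse c := by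
  unfold pvParse
  by_cases h1 : PySem.Int.isIntSpace c
  · simp [PySem.Int.ofChars?, h1]; exact parse_bind_nonneg _
  · by_cases h2 : c = '-'
    · subst h2; decide
    · by_cases h3 : c = '+'
      · subst h3; decide
      · simp [PySem.Int.ofChars?, h1]
        split <;> rename_i heq <;> try exact parse_bind_nonneg _
        all_goals simp_all

theorem toDigitsCore_len (b : Nat) : ∀ (fuel n : Nat) (acc : List Char), acc.length ≤ (Nat.toDigitsCore b fuel n acc).length := by
  intro fuel
  induction fuel with
  | zero => intro n acc; simp [Nat.toDigitsCore]
  | succ f ih =>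
    intro n acc
    rw [Nat.toDigitsCore]
    split
    · simp
    · exact le_trans (by simp) (ih _ _)

theorem toChars_ne_nil (n : Int) (h : 0 ≤ n) : PySem.Int.toChars n ≠ [] := by
  simp only [PySem.Int.toChars, if_neg (not_lt.mpr h), Nat.toDigits]
  intro hc
  have h2 : ([] : List Char).length + 1 ≤ (Nat.toDigitsCore 10 (n.toNat + 1) n.toNat []).length := by
    rw [Nat.toDigitsCore]
    split
    · simp
    · exact le_trans (by simp) (toDigitsCore_len 10 _ _ _)
  rw [hc] at h2; simp at h2

-- A's loop in the replace-regime: it only copies r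
theorem foldA_replace : ∀ (cs : List Char) (prev : Int) (r : String) (acc : List String),
    cs.foldl skipStepA (prev, some r, acc) = (prev, some r, acc ++ List.replicate cs.length r) := by
  intro cs
  induction cs with
  | nil => intro prev r acc; simp
  | cons x cs ih =>
    intro prev r acc
    simp only [List.foldl_cons, skipStepA, ih]
    simp [List.replicate_succ]

-- A's loop in the scanning regime computes fill2
theorem foldA_none : ∀ (cs : List Char) (prev : Int) (acc : List String),
    (cs.foldl skipStepA (prev, none, acc)).2.2 = acc ++ (fill2 prev (cs.map pvParse)).map PySem.Int.toStr := by
  intro cs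
  induction cs with
  | nil => intro prev acc; simp [fill2]
  | cons x cs ih =>
    intro prev acc
    simp only [List.foldl_cons, List.map_cons, fill2, skipStepA, parse_eq]
    by_cases h : pvParse x < prev
    · rw [if_pos h, if_pos h, foldA_replace]
      simp [List.replicate_succ]
    · rw [if_neg h, if_neg h, ih]
      simp

theorem upTo_len : ∀ (l : List Int) (prev : Int), (upTo prev l).length ≤ l.length := by
  intro l
  induction l with
  | nil => intro prev; simp [upTo]
  | cons d rest ih =>
    intro prev
    simp only [upTo]
    split
    · simp
    · simpa using ih d

-- B's loop appends the nondecreasing continuation of the last prefix element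
theorem prefixLoop_eq : ∀ (rest pre : List Int) (h : pre ≠ []),
    prefixLoop pre rest = pre ++ upTo (pre.getLast h) rest := by
  intro rest
  induction rest with
  | nil => intro pre h; simp [prefixLoop, upTo]
  | cons d rest ih =>
    intro pre h
    simp only [prefixLoop, upTo]
    rw [PySem.List.pyGetD_neg_one pre 0 h]
    by_cases hd : d < pre.getLast h
    · rw [if_pos hd, if_pos hd]
      simp
    · rw [if_neg hd, if_neg hd, ih (pre ++ [d]) (by simp)]
      simp

-- fill2 = nondecreasing continuation + padding with its last element
theorem fill2_eq : ∀ (rest : List Int) (prev : Int),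
    fill2 prev rest = upTo prev rest
      ++ List.replicate (rest.length - (upTo prev rest).length)
          ((prev :: upTo prev rest).getLast (List.cons_ne_nil _ _)) := by
  intro rest
  induction rest with
  | nil => intro prev; simp [fill2, upTo]
  | cons d rest ih =>
    intro prev
    simp only [fill2, upTo]
    by_cases hd : d < prev
    · simp [hd]
    · simp only [if_neg hd]
      rw [ih d, List.getLast_cons (List.cons_ne_nil _ _)]
      have hl : (d :: rest).length - (d :: upTo d rest).length
          = rest.length - (upTo d rest).length := by simp
      rw [hl]
      simp

-- ===== VERDICT (by name: the statement is the Claim_ definition above) =====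
theorem skip_numbers_spec : Claim_equal_skip_numbers := by
  intro number _ hpre
  unfold Spec_skip_numbers skip_numbers skip_numbers_alt
  have hcs : (PySem.Int.toStr number).toList = PySem.Int.toChars number := PySem.Int.toList_toStr number
  obtain ⟨c0, cs', hc⟩ : ∃ c0 cs', PySem.Int.toChars number = c0 :: cs' := by
    rcases h : PySem.Int.toChars number with _ | ⟨c0, cs'⟩
    · exact absurd h (toChars_ne_nil number hpre)
    · exact ⟨c0, cs', rfl⟩
  have hpf : (fun x => (PySem.Int.ofStr? (String.mk [x])).getD 0) = pvParse := funext parse_eq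
  simp only [hcs, hc, hpf]
  have hstep1 : skipStepA (0, none, []) c0 = (pvParse c0, none, [PySem.Int.toStr (pvParse c0)]) := by
    simp [skipStepA, parse_eq, not_lt.mpr (parse_nonneg c0)]
  have hA : ((c0 :: cs').foldl skipStepA ((0 : Int), none, ([] : List String))).2.2
      = (pvParse c0 :: fill2 (pvParse c0) (cs'.map pvParse)).map PySem.Int.toStr := by
    rw [List.foldl_cons, hstep1, foldA_none]
    simp
  have hdig : (c0 :: cs').map pvParse = pvParse c0 :: cs'.map pvParse := by simp
  have hsl1 : PySem.List.slice (pvParse c0 :: cs'.map pvParse) none (some 1) = [pvParse c0] := by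
    rw [PySem.List.slice_to _ (by norm_num : (0:Int) ≤ 1)]
    simp
  have hsl2 : PySem.List.slice (pvParse c0 :: cs'.map pvParse) (some 1) none = cs'.map pvParse := by
    rw [PySem.List.slice_from_one _]
    simp
  have hpre0 : prefixLoop [pvParse c0] (cs'.map pvParse)
      = pvParse c0 :: upTo (pvParse c0) (cs'.map pvParse) := by
    rw [prefixLoop_eq (cs'.map pvParse) [pvParse c0] (by simp)]
    simp
  have hne : pvParse c0 :: upTo (pvParse c0) (cs'.map pvParse) ≠ [] := List.cons_ne_nil _ _
  have hfill : (pvParse c0 :: upTo (pvParse c0) (cs'.map pvParse))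
        ++ PySem.List.pyRepeat [PySem.List.pyGetD (pvParse c0 :: upTo (pvParse c0) (cs'.map pvParse)) (-1) 0]
            (((pvParse c0 :: cs'.map pvParse).length : Int)
              - ((pvParse c0 :: upTo (pvParse c0) (cs'.map pvParse)).length : Int))
      = pvParse c0 :: fill2 (pvParse c0) (cs'.map pvParse) := by
    rw [PySem.List.pyRepeat_singleton, PySem.List.pyGetD_neg_one _ 0 hne]
    have hlen : (((pvParse c0 :: cs'.map pvParse).length : Int)
        - ((pvParse c0 :: upTo (pvParse c0) (cs'.map pvParse)).length : Int)).toNat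
        = (cs'.map pvParse).length - (upTo (pvParse c0) (cs'.map pvParse)).length := by
      have := upTo_len (cs'.map pvParse) (pvParse c0)
      simp only [List.length_cons]
      omega
    rw [hlen, fill2_eq]
    simp
  simp only [hA, hdig, hsl1, hsl2, hpre0, hfill]
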